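-- pv_equiv track=rewrite | github.com/kevin-quiroz/Sintaxis | AguAFD.py | automataEntonces
-- ===== SOURCE A (Python) =====
-- ESTADO_FINAL = "ESTADO FINAL"
--
-- ESTADO_NO_FINAL = "NO ACEPTADO"
--
-- ESTADO_TRAMPA = "EN ESTADO TRAMPA"
--
-- def automataEntonces(lexema):
--     estado = 0
--     estadoFinal = [8]
--     for caracter in lexema:
--         if estado == 0 and caracter == "e":
--             estado = 1
--         elif estado == 1 and caracter == "n":
--             estado = 2
--         elif estado == 2 and caracter == "t":
--             estado = 3
--         elif estado == 3 and caracter == "o":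
--             estado = 4
--         elif estado == 4 and caracter == "n":
--             estado = 5
--         elif estado == 5 and caracter == "c":
--             estado = 6
--         elif estado == 6 and caracter == "e":
--             estado = 7
--         elif estado == 7 and caracter == "s":
--             estado = 8
--         else:
--             estado = -1
--             break
--     if estado == -1:
--         return ESTADO_TRAMPA
--     elif estado in estadoFinal:
--         return ESTADO_FINAL
--     else:
--         return ESTADO_NO_FINAL
-- ===== SOURCE B (Python) =====
-- ESTADO_FINAL = "ESTADO FINAL"
--
-- ESTADO_NO_FINAL = "NO ACEPTADO"
--
-- ESTADO_TRAMPA = "EN ESTADO TRAMPA"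
--
-- def automataEntonces(lexema):
--     target = "entonces"
--     if lexema == target:
--         return ESTADO_FINAL
--     elif target.startswith(lexema):
--         return ESTADO_NO_FINAL
--     else:
--         return ESTADO_TRAMPA
-- ===== Notes on version B (the rewrite author's own statement) =====
-- stated objective: idiomatic
-- what changed: Replaced the 9-state hand-written DFA loop with a direct string comparison against the target keyword: equality gives the final state, a proper prefix (via startswith) gives the non-final state, anything else the trap state.
import Mathlib
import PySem

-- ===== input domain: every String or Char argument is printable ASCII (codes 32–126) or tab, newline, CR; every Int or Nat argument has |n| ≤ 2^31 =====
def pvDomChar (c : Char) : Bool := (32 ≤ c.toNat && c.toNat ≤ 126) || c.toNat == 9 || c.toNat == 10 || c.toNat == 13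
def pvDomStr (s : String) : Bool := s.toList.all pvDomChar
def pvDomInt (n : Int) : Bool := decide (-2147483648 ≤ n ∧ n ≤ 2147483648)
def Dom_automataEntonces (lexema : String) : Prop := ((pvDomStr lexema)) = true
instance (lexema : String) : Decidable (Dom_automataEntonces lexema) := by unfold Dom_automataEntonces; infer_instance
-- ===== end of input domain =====

-- B replaces A's hand-written 9-state DFA loop with a direct comparison against the
-- keyword "entonces" (equality, then a prefix test); idiomatic, same cost.

-- ===== PORT A =====
-- the for-loop of A, with `break` modelled by returning -1 immediately (nothing after the loop body reads further characters once estado = -1)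
def pvEntLoop : List Char → Int → Int
  | [], estado => estado
  | caracter :: rest, estado =>
    if estado = 0 ∧ caracter = 'e' then pvEntLoop rest 1
    else if estado = 1 ∧ caracter = 'n' then pvEntLoop rest 2
    else if estado = 2 ∧ caracter = 't' then pvEntLoop rest 3
    else if estado = 3 ∧ caracter = 'o' then pvEntLoop rest 4
    else if estado = 4 ∧ caracter = 'n' then pvEntLoop rest 5
    else if estado = 5 ∧ caracter = 'c' then pvEntLoop rest 6
    else if estado = 6 ∧ caracter = 'e' then pvEntLoop rest 7
    else if estado = 7 ∧ caracter = 's' then pvEntLoop rest 8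
    else (-1)

def automataEntonces (lexema : String) : String :=
  let estadoFinal : List Int := [8]
  let estado := pvEntLoop lexema.toList 0
  if estado = -1 then "EN ESTADO TRAMPA"
  else if estado ∈ estadoFinal then "ESTADO FINAL"
  else "NO ACEPTADO"

-- ===== PORT B =====
def automataEntonces_alt (lexema : String) : String :=
  if lexema = "entonces" then "ESTADO FINAL"
  else if PySem.Str.startswith "entonces" lexema then "NO ACEPTADO"
  else "EN ESTADO TRAMPA"

-- ===== PRECONDITION & SPEC =====
def Spec_automataEntonces (lexema : String) (out : String) : Prop := out = automataEntonces_alt lexema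
instance (lexema : String) (out : String) : Decidable (Spec_automataEntonces lexema out) := by unfold Spec_automataEntonces; infer_instance

-- ===== CLAIM (what is proved, stated in full; the proofs are below) =====
def Claim_equal_automataEntonces : Prop := ∀ (lexema : String), Dom_automataEntonces lexema → Spec_automataEntonces lexema (automataEntonces lexema)

-- ===== LEMMAS AND PROOFS =====

def pvTgt : List Char := "entonces".toList

-- classify cs against the remaining expected characters rem, exactly as A's loop does
def pvJudge : List Char → List Char → String
  | [], [] => "ESTADO FINAL"
  | _ :: _, [] => "NO ACEPTADO"
  | [], _ :: _ => "EN ESTADO TRAMPA"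
  | r :: rem, c :: cs => if c = r then pvJudge rem cs else "EN ESTADO TRAMPA"

def pvFinish (e : Int) : String :=
  if e = -1 then "EN ESTADO TRAMPA"
  else if e ∈ ([8] : List Int) then "ESTADO FINAL"
  else "NO ACEPTADO"

lemma pvLoop_judge : ∀ (cs : List Char) (k : Int), 0 ≤ k → k ≤ 8 →
    pvFinish (pvEntLoop cs k) = pvJudge (pvTgt.drop k.toNat) cs := by
  intro cs
  induction cs with
  | nil =>
    intro k h0 h8
    interval_cases k <;> simp [pvEntLoop, pvJudge, pvFinish, pvTgt]
  | cons c cs ih =>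
    intro k h0 h8
    interval_cases k
    · by_cases hc : c = 'e'
      · have hstep : pvEntLoop (c :: cs) 0 = pvEntLoop cs 1 := by simp [pvEntLoop, hc]
        rw [hstep]
        simpa [pvTgt, pvJudge, hc] using ih 1 (by norm_num) (by norm_num)
      · simp [pvEntLoop, pvJudge, pvFinish, pvTgt, hc]
    · by_cases hc : c = 'n'
      · have hstep : pvEntLoop (c :: cs) 1 = pvEntLoop cs 2 := by simp [pvEntLoop, hc]
        rw [hstep]
        simpa [pvTgt, pvJudge, hc] using ih 2 (by norm_num) (by norm_num)
      · simp [pvEntLoop, pvJudge, pvFinish, pvTgt, hc]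
    · by_cases hc : c = 't'
      · have hstep : pvEntLoop (c :: cs) 2 = pvEntLoop cs 3 := by simp [pvEntLoop, hc]
        rw [hstep]
        simpa [pvTgt, pvJudge, hc] using ih 3 (by norm_num) (by norm_num)
      · simp [pvEntLoop, pvJudge, pvFinish, pvTgt, hc]
    · by_cases hc : c = 'o'
      · have hstep : pvEntLoop (c :: cs) 3 = pvEntLoop cs 4 := by simp [pvEntLoop, hc]
        rw [hstep]
        simpa [pvTgt, pvJudge, hc] using ih 4 (by norm_num) (by norm_num)
      · simp [pvEntLoop, pvJudge, pvFinish, pvTgt, hc]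
    · by_cases hc : c = 'n'
      · have hstep : pvEntLoop (c :: cs) 4 = pvEntLoop cs 5 := by simp [pvEntLoop, hc]
        rw [hstep]
        simpa [pvTgt, pvJudge, hc] using ih 5 (by norm_num) (by norm_num)
      · simp [pvEntLoop, pvJudge, pvFinish, pvTgt, hc]
    · by_cases hc : c = 'c'
      · have hstep : pvEntLoop (c :: cs) 5 = pvEntLoop cs 6 := by simp [pvEntLoop, hc]
        rw [hstep]
        simpa [pvTgt, pvJudge, hc] using ih 6 (by norm_num) (by norm_num)
      · simp [pvEntLoop, pvJudge, pvFinish, pvTgt, hc]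
    · by_cases hc : c = 'e'
      · have hstep : pvEntLoop (c :: cs) 6 = pvEntLoop cs 7 := by simp [pvEntLoop, hc]
        rw [hstep]
        simpa [pvTgt, pvJudge, hc] using ih 7 (by norm_num) (by norm_num)
      · simp [pvEntLoop, pvJudge, pvFinish, pvTgt, hc]
    · by_cases hc : c = 's'
      · have hstep : pvEntLoop (c :: cs) 7 = pvEntLoop cs 8 := by simp [pvEntLoop, hc]
        rw [hstep]
        simpa [pvTgt, pvJudge, hc] using ih 8 (by norm_num) (by norm_num)
      · simp [pvEntLoop, pvJudge, pvFinish, pvTgt, hc]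
    · simp [pvEntLoop, pvJudge, pvFinish, pvTgt]

lemma pvJudge_closed : ∀ (rem cs : List Char),
    pvJudge rem cs =
      if cs = rem then "ESTADO FINAL"
      else if cs <+: rem then "NO ACEPTADO"
      else "EN ESTADO TRAMPA" := by
  intro rem
  induction rem with
  | nil => intro cs; cases cs <;> simp [pvJudge]
  | cons r rem ih =>
    intro cs
    cases cs with
    | nil => simp [pvJudge]
    | cons c cs =>
      by_cases hc : c = r
      · subst hc
        simp [pvJudge, ih cs]
      · simp [pvJudge, hc, List.cons_prefix_cons]

theorem pv_main (lexema : String) : automataEntonces lexema = automataEntonces_alt lexema := by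
  have h := pvLoop_judge lexema.toList 0 (by norm_num) (by norm_num)
  have hfin : automataEntonces lexema = pvFinish (pvEntLoop lexema.toList 0) := by
    simp [automataEntonces, pvFinish]
  rw [hfin, h]
  simp only [Int.toNat_zero, List.drop_zero]
  rw [pvJudge_closed]
  unfold automataEntonces_alt
  have hpre : (PySem.Str.startswith "entonces" lexema = true) ↔ (lexema.toList <+: pvTgt) := by
    simp [pvTgt, PySem.Chars.startswith_iff]
  by_cases h1 : lexema = "entonces"
  · subst h1; simp [pvTgt]
  · have h1' : lexema.toList ≠ pvTgt := by
      intro hh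
      apply h1
      have := congrArg String.ofList hh
      simpa [pvTgt] using this
    rw [if_neg h1', if_neg h1]
    by_cases h2 : lexema.toList <+: pvTgt
    · rw [if_pos h2, if_pos (hpre.mpr h2)]
    · rw [if_neg h2, if_neg (fun hh => h2 (hpre.mp hh))]

-- ===== VERDICT (by name: the statement is the Claim_ definition above) =====
theorem automataEntonces_spec : Claim_equal_automataEntonces := by
  intro lexema _
  unfold Spec_automataEntonces
  exact (pv_main lexema)
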